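-- pv_equiv track=rewrite | github.com/quket/quket | quket/tapering/tapering.py | RealBin2Pauli
-- ===== SOURCE A (Python) =====
-- def RealBin2Pauli(a, n_qubits, swap=False):
--     if swap:
--         ax = a & 2**n_qubits-1  #  0011'1001'
--         az = a >> n_qubits      # '0011'1001
--     else:
--         az = a & 2**n_qubits-1  #  0011'1001'
--         ax = a >> n_qubits      # '0011'1001
--     ay = ax & az
--     ax = (~ay) & ax
--     az = (~ay) & az
--     a = {'X':bin(ax)[2:], 'Y':bin(ay)[2:], 'Z':bin(az)[2:]}
--     pauli = []
--     for key,val in a.items():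
--         head_len = n_qubits - len(val)
--         start_pt = 0
--         while True:
--             try:
--                 index = val.index('1',start_pt)
--                 bit = index + head_len
--                 pauli.append((bit, key))
--                 start_pt = index+1
--             except ValueError:
--                 break
--     return pauli
-- ===== SOURCE B (Python) =====
-- def RealBin2Pauli(a, n_qubits, swap=False):
--     if swap:
--         ax = a & 2**n_qubits - 1
--         az = a >> n_qubits
--     else:
--         az = a & 2**n_qubits - 1
--         ax = a >> n_qubits
--     ay = ax & az
--     ax &= ~ay
--     az &= ~ay
--     pauli = []
--     for key, val in (('X', ax), ('Y', ay), ('Z', az)):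
--         for e in range(val.bit_length() - 1, -1, -1):
--             if (val >> e) & 1:
--                 pauli.append((n_qubits - 1 - e, key))
--     return pauli
-- ===== Notes on version B (the rewrite author's own statement) =====
-- stated objective: simpler
-- what changed: Replaces A's bin()-string construction and str.index/try-except sparse scanning with a direct loop over integer bit positions; Pre_ excludes n_qubits < 0, where A raises TypeError, and a < 0, outside the natural domain of binary symplectic vectors, where A's positions are an artifact of the 'b' left over from slicing bin()'s '-0b' prefix.
-- outside the precondition, e.g. on RealBin2Pauli(-2, 2, False): A returns [(0, 'X'), (1, 'X'), (0, 'Y')], B returns [(1, 'X'), (0, 'Y')]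
import Mathlib
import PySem

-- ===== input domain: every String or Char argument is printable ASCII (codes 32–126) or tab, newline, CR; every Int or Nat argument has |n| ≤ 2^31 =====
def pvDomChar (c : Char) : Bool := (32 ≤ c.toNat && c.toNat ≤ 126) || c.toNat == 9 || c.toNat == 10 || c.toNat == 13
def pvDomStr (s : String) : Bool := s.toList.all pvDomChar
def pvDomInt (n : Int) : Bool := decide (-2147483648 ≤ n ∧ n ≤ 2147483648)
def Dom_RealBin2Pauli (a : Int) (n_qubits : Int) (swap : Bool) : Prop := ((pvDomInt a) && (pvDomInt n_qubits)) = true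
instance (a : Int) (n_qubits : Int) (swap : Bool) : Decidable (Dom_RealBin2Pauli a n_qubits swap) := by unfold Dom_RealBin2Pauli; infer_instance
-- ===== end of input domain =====

-- B replaces A's bin()-string building and str.index/try-except scanning by direct integer bit tests (same masking prelude, same output order).

-- ===== PORT A =====
-- big-endian binary digits of a natural number, [] for 0 (the digits part of bin(n))
def pvBits (n : Nat) : List Char :=
  if h : n = 0 then [] else pvBits (n / 2) ++ [if n % 2 = 1 then '1' else '0']
decreasing_by exact Nat.div_lt_self (Nat.pos_of_ne_zero h) (by norm_num)

-- bin(x)[2:] : for x ≥ 0 the digits ('0' for 0); for x < 0 the 'b' of '-0b…' survives the [2:] slice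
def pvBin2 (x : Int) : List Char :=
  (if x < 0 then ['b'] else []) ++ (if x.natAbs = 0 then ['0'] else pvBits x.natAbs)

-- A's `while True: try: index = val.index('1', start_pt) … except ValueError: break` loop.
-- str.index raising ValueError = PySem.Chars.findFrom (s.find(sub, start)) returning -1.
-- The fuel argument only makes the recursion total: each iteration moves start_pt past a
-- found '1', so s.length + 1 iterations always suffice — with that fuel this is exactly
-- Python's unbounded while loop.
def pvScanA (s : List Char) (head_len : Int) (key : String) : Nat → Int → List (Int × String) → List (Int × String)
  | 0, _, acc => acc
  | fuel + 1, start_pt, acc =>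
      let index := PySem.Chars.findFrom s ['1'] start_pt
      if index = -1 then acc
      else pvScanA s head_len key fuel (index + 1) (acc ++ [(index + head_len, key)])

def RealBin2Pauli (a : Int) (n_qubits : Int) (swap : Bool) : List (Int × String) :=
  -- 2**n_qubits and a >> n_qubits: exact for n_qubits ≥ 0 (Pre_); Python raises TypeError for negative n_qubits
  let ax0 := if swap then PySem.Int.band a (2 ^ n_qubits.toNat - 1) else a >>> n_qubits.toNat
  let az0 := if swap then a >>> n_qubits.toNat else PySem.Int.band a (2 ^ n_qubits.toNat - 1)
  let ay := PySem.Int.band ax0 az0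
  let ax := PySem.Int.band (Int.not ay) ax0
  let az := PySem.Int.band (Int.not ay) az0
  -- the dict {'X': bin(ax)[2:], 'Y': bin(ay)[2:], 'Z': bin(az)[2:]} iterated in insertion order
  let items : List (String × List Char) := [("X", pvBin2 ax), ("Y", pvBin2 ay), ("Z", pvBin2 az)]
  items.foldl (fun pauli kv => pvScanA kv.2 (n_qubits - (kv.2.length : Int)) kv.1 (kv.2.length + 1) 0 pauli) []

-- ===== PORT B =====
-- for e in range(val.bit_length()-1, -1, -1): if (val >> e) & 1: pauli.append((n_qubits-1-e, key))
def pvEmit (val : Int) (n_qubits : Int) (key : String) (pauli : List (Int × String)) : List (Int × String) :=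
  (PySem.List.pyRange ((PySem.Int.bitLength val : Int) - 1) (-1) (-1)).foldl
    (fun acc e => if PySem.Int.band (val >>> e.toNat) 1 ≠ 0 then acc ++ [(n_qubits - 1 - e, key)] else acc) pauli

def RealBin2Pauli_alt (a : Int) (n_qubits : Int) (swap : Bool) : List (Int × String) :=
  let ax0 := if swap then PySem.Int.band a (2 ^ n_qubits.toNat - 1) else a >>> n_qubits.toNat
  let az0 := if swap then a >>> n_qubits.toNat else PySem.Int.band a (2 ^ n_qubits.toNat - 1)
  let ay := PySem.Int.band ax0 az0
  let ax := PySem.Int.band (Int.not ay) ax0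
  let az := PySem.Int.band (Int.not ay) az0
  let items : List (String × Int) := [("X", ax), ("Y", ay), ("Z", az)]
  items.foldl (fun pauli kv => pvEmit kv.2 n_qubits kv.1 pauli) []

-- ===== PRECONDITION & SPEC =====
-- Pre_ excludes n_qubits < 0, where Python A raises (2**n_qubits is a float there, so `a & …` is a
-- TypeError), and a < 0, which lies outside the natural domain of binary symplectic vectors and where
-- A's emitted positions are an artifact of the 'b' left over from slicing bin()'s '-0b' prefix.
def Pre_RealBin2Pauli (a : Int) (n_qubits : Int) (swap : Bool) : Prop := 0 ≤ n_qubits ∧ 0 ≤ a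
instance (a : Int) (n_qubits : Int) (swap : Bool) : Decidable (Pre_RealBin2Pauli a n_qubits swap) := by unfold Pre_RealBin2Pauli; infer_instance
def pvWitness_RealBin2Pauli : Int × Int × Bool := (57, 3, false)

def Spec_RealBin2Pauli (a : Int) (n_qubits : Int) (swap : Bool) (out : List (Int × String)) : Prop := out = RealBin2Pauli_alt a n_qubits swap
instance (a : Int) (n_qubits : Int) (swap : Bool) (out : List (Int × String)) : Decidable (Spec_RealBin2Pauli a n_qubits swap out) := by unfold Spec_RealBin2Pauli; infer_instance

-- ===== CLAIM (what is proved, stated in full; the proofs are below) =====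
def Claim_equal_RealBin2Pauli : Prop := ∀ (a : Int) (n_qubits : Int) (swap : Bool), Dom_RealBin2Pauli a n_qubits swap → Pre_RealBin2Pauli a n_qubits swap → Spec_RealBin2Pauli a n_qubits swap (RealBin2Pauli a n_qubits swap)

-- ===== LEMMAS AND PROOFS =====

-- indices i ≥ start with s[i] = '1', in increasing order: what A's index-scanning loop collects
def pvOnes (s : List Char) (start : Nat) : List Nat :=
  (List.range s.length).filter (fun i => decide (start ≤ i) && (s.getD i ' ' == '1'))

theorem pvBits_length (w : Nat) : (pvBits w).length = PySem.Int.bitLength (w : Int) := by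
  induction w using Nat.strong_induction_on with
  | _ w ih =>
    rw [pvBits]
    by_cases h : w = 0
    · simp [h, PySem.Int.bitLength_zero]
    · simp only [h, dif_neg, not_false_iff, List.length_append, List.length_cons, List.length_nil]
      rw [ih (w/2) (Nat.div_lt_self (Nat.pos_of_ne_zero h) (by norm_num)),
        PySem.Int.bitLength_natCast (Nat.pos_of_ne_zero h)]

theorem pvOnes_append (t : List Char) (c : Char) :
    pvOnes (t ++ [c]) 0 = pvOnes t 0 ++ (if c = '1' then [t.length] else []) := by
  unfold pvOnes
  rw [List.length_append, List.length_singleton, List.range_succ, List.filter_append]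
  congr 1
  · apply List.filter_congr
    intro i hi
    simp only [List.mem_range] at hi
    simp [List.getD, List.getElem?_append_left hi]
  · simp only [List.filter_cons, List.filter_nil]
    have : (t ++ [c]).getD t.length ' ' = c := by
      simp [List.getD]
    by_cases hc : c = '1' <;> simp [hc]

theorem pvOnes_bits (w : Nat) :
    pvOnes (pvBits w) 0
      = (List.range (PySem.Int.bitLength (w : Int))).filter
          (fun k => w.testBit (PySem.Int.bitLength (w : Int) - 1 - k)) := by
  induction w using Nat.strong_induction_on with
  | _ w ih =>
    by_cases h : w = 0
    · subst h
      simp [pvBits, pvOnes, PySem.Int.bitLength_zero]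
    · have hq := Nat.div_lt_self (Nat.pos_of_ne_zero h) (show 1 < 2 by norm_num)
      rw [pvBits, dif_neg h, pvOnes_append, ih (w/2) hq, pvBits_length,
        PySem.Int.bitLength_natCast (Nat.pos_of_ne_zero h), List.range_succ, List.filter_append]
      congr 1
      · apply List.filter_congr
        intro k hk
        simp only [List.mem_range] at hk
        have e1 : PySem.Int.bitLength (((w/2 : Nat) : Int)) + 1 - 1 - k
            = (PySem.Int.bitLength (((w/2 : Nat) : Int)) - 1 - k) + 1 := by omega
        rw [e1, Nat.testBit_add_one]
      · simp only [List.filter_cons, List.filter_nil]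
        have : PySem.Int.bitLength (((w/2 : Nat) : Int)) + 1 - 1 - PySem.Int.bitLength (((w/2 : Nat) : Int)) = 0 := by omega
        rw [this, Nat.testBit_zero]
        by_cases hw : w % 2 = 1 <;> simp [hw]

theorem pvOnes_eq_nil (s : List Char) (start : Nat)
    (h : ∀ i, start ≤ i → i < s.length → s.getD i ' ' ≠ '1') : pvOnes s start = [] := by
  unfold pvOnes
  rw [List.filter_eq_nil_iff]
  intro i hi
  simp only [List.mem_range] at hi
  by_cases hs : start ≤ i
  · simp only [hs, decide_true, Bool.true_and]
    simpa [List.getD] using h i hs hi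
  · simp [hs]

theorem pvOnes_step (s : List Char) (start r : Nat) (hr : r < s.length) (hsr : start ≤ r)
    (h1 : s.getD r ' ' = '1') (hmin : ∀ i, start ≤ i → i < r → s.getD i ' ' ≠ '1') :
    pvOnes s start = r :: pvOnes s (r + 1) := by
  unfold pvOnes
  have hlen : s.length = (r + 1) + (s.length - (r + 1)) := by omega
  rw [hlen, List.range_add, List.filter_append, List.filter_append]
  have h2 : List.filter (fun i => decide (start ≤ i) && (s.getD i ' ' == '1')) (List.range (r+1)) = [r] := by
    rw [List.range_succ, List.filter_append]
    have : List.filter (fun i => decide (start ≤ i) && (s.getD i ' ' == '1')) (List.range r) = [] := by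
      rw [List.filter_eq_nil_iff]
      intro i hi
      simp only [List.mem_range] at hi
      by_cases hs : start ≤ i
      · simp only [hs, decide_true, Bool.true_and]
        simpa [List.getD] using hmin i hs hi
      · simp [hs]
    have h1' : s[r]?.getD ' ' = '1' := by simpa [List.getD] using h1
    simp [hsr, h1']
    intro a ha hs
    simpa [List.getD] using hmin a hs ha
  have h3 : List.filter (fun i => decide (r + 1 ≤ i) && (s.getD i ' ' == '1')) (List.range (r+1)) = [] := by
    rw [List.filter_eq_nil_iff]
    intro i hi
    simp only [List.mem_range] at hi
    simp [show ¬ (r + 1 ≤ i) by omega]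
  have h4 : List.filter (fun i => decide (start ≤ i) && (s.getD i ' ' == '1'))
        ((List.range (s.length - (r+1))).map (fun x => (r+1) + x))
      = List.filter (fun i => decide (r + 1 ≤ i) && (s.getD i ' ' == '1'))
        ((List.range (s.length - (r+1))).map (fun x => (r+1) + x)) := by
    apply List.filter_congr
    intro i hi
    simp only [List.mem_map, List.mem_range] at hi
    obtain ⟨x, -, rfl⟩ := hi
    simp [show start ≤ r + 1 + x by omega, show r + 1 ≤ r + 1 + x by omega]
  rw [h2, h3, h4]
  simp

theorem pvPrefix_singleton (l : List Char) (c : Char) : [c] <+: l ↔ l.head? = some c := by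
  constructor
  · rintro ⟨t, rfl⟩; rfl
  · intro h
    cases l with
    | nil => simp at h
    | cons a t => simp only [List.head?_cons, Option.some.injEq] at h; exact ⟨t, by simp [h]⟩

theorem pvScanA_eq (s : List Char) (hl : Int) (key : String) :
    ∀ (fuel : Nat) (start : Nat) (acc : List (Int × String)),
      start ≤ s.length → s.length - start < fuel →
      pvScanA s hl key fuel (start : Int) acc
        = acc ++ (pvOnes s start).map (fun (i : Nat) => ((i : Int) + hl, key)) := by
  intro fuel
  induction fuel with
  | zero => intro start acc h1 h2; omega
  | succ fuel ih =>
    intro start acc hstart hfuel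
    rw [pvScanA]
    by_cases hidx : PySem.Chars.findFrom s ['1'] (start : Int) = -1
    · rw [if_pos hidx]
      have hnin : ¬ ['1'] <:+: s.drop start :=
        (PySem.Chars.findFrom_natCast_eq_neg_one_iff s ['1'] start hstart).mp hidx
      rw [List.singleton_infix_iff] at hnin
      rw [pvOnes_eq_nil s start, List.map_nil, List.append_nil]
      intro i hsi hil hgd
      apply hnin
      have hgi : s[i] = '1' := by
        simp only [List.getD, List.getElem?_eq_getElem hil, Option.getD_some] at hgd
        exact hgd
      have hlen2 : i - start < (s.drop start).length := by
        rw [List.length_drop]; omega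
      rw [List.mem_iff_getElem]
      refine ⟨i - start, hlen2, ?_⟩
      rw [List.getElem_drop]
      have hidx2 : start + (i - start) = i := by omega
      simp only [hidx2]
      exact hgi
    · rw [if_neg hidx]
      obtain ⟨hge, hpre, hmin⟩ := PySem.Chars.findFrom_natCast_spec s ['1'] start hstart hidx
      set idx := PySem.Chars.findFrom s ['1'] (start : Int) with hidxdef
      have hnn : 0 ≤ idx := le_trans (Int.natCast_nonneg start) hge
      set r := idx.toNat with hrdef
      have hidxr : idx = (r : Int) := (Int.toNat_of_nonneg hnn).symm
      have hhead : (s.drop r).head? = some '1' := (pvPrefix_singleton _ _).mp hpre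
      rw [List.head?_drop] at hhead
      have hrlt : r < s.length := by
        by_contra hc
        rw [List.getElem?_eq_none (by omega)] at hhead
        simp at hhead
      have h1 : s.getD r ' ' = '1' := by simp [List.getD, hhead]
      have hsr : start ≤ r := by omega
      have hminD : ∀ i, start ≤ i → i < r → s.getD i ' ' ≠ '1' := by
        intro i hsi hir hgd
        apply hmin i hsi hir
        rw [pvPrefix_singleton, List.head?_drop]
        have hil : i < s.length := by omega
        simp only [List.getD, List.getElem?_eq_getElem hil, Option.getD_some] at hgd
        rw [List.getElem?_eq_getElem hil, hgd]
      rw [pvOnes_step s start r hrlt hsr h1 hminD, List.map_cons, hidxr]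
      rw [show ((r : Int) + 1) = (((r + 1 : Nat)) : Int) by push_cast; ring]
      rw [ih (r + 1) (acc ++ [((r : Int) + hl, key)]) (by omega) (by omega)]
      simp

theorem pvBand_one (w m : Nat) :
    (PySem.Int.band ((w : Int) >>> ((m : Nat) : Int)) 1 ≠ 0) ↔ w.testBit m = true := by
  have h1 : ((w : Int) >>> ((m : Nat) : Int)) = ((w >>> m : Nat) : Int) := Int.shiftRight_natCast w m
  have h2 : PySem.Int.band ((w >>> m : Nat) : Int) 1 = (((w >>> m) &&& 1 : Nat) : Int) := by
    exact_mod_cast PySem.Int.band_natCast (w >>> m) 1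
  rw [h1, h2]
  simp only [ne_eq, Int.natCast_eq_zero]
  rw [Nat.and_one_is_mod, ← Nat.decide_shiftRight_mod_two_eq_one]
  simp only [decide_eq_true_eq]
  omega

theorem pvEmit_foldl (w : Nat) (n : Int) (key : String) :
    ∀ (l : List Int) (acc : List (Int × String)),
      l.foldl (fun acc e => if PySem.Int.band ((w : Int) >>> e.toNat) 1 ≠ 0
          then acc ++ [(n - 1 - e, key)] else acc) acc
        = acc ++ (l.filter (fun e => w.testBit e.toNat)).map (fun e => (n - 1 - e, key)) := by
  intro l
  induction l with
  | nil => intro acc; simp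
  | cons e t ih =>
    intro acc
    rw [List.foldl_cons, List.filter_cons]
    by_cases hb : w.testBit e.toNat
    · rw [if_pos ((pvBand_one w e.toNat).mpr hb)]
      simp only [hb, ite_true, List.map_cons]
      rw [ih]
      simp
    · rw [if_neg (fun hc => hb ((pvBand_one w e.toNat).mp hc))]
      simp only [hb]
      exact ih acc

theorem pvPerVal (val n : Int) (key : String) (pauli : List (Int × String)) (hval : 0 ≤ val) :
    pvScanA (pvBin2 val) (n - ((pvBin2 val).length : Int)) key ((pvBin2 val).length + 1) 0 pauli
      = pvEmit val n key pauli := by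
  set w := val.toNat with hw
  have hv : val = ((w : Nat) : Int) := (Int.toNat_of_nonneg hval).symm
  set L := PySem.Int.bitLength (w : Int) with hL
  have hB : pvEmit val n key pauli
      = pauli ++ ((List.range L).filter (fun k => w.testBit (L - 1 - k))).map
          (fun (k : Nat) => ((k : Int) + (n - (L : Int)), key)) := by
    unfold pvEmit
    rw [hv, PySem.List.pyRange_neg_one,
      show (((PySem.Int.bitLength ((w : Nat) : Int) : Int)) - 1 - (-1)).toNat = L by omega]
    rw [pvEmit_foldl w n key]
    rw [List.filter_map, List.map_map]
    congr 1
    have hfc : List.filter ((fun e => w.testBit e.toNat) ∘ (fun (k : Nat) => (L : Int) - 1 - (k : Int))) (List.range L)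
        = List.filter (fun k => w.testBit (L - 1 - k)) (List.range L) := by
      apply List.filter_congr
      intro k hk
      simp only [List.mem_range] at hk
      simp only [Function.comp_apply]
      congr 1
      omega
    rw [hfc]
    apply List.map_congr_left
    intro k hk
    have hkL : k < L := by
      simp only [List.mem_filter, List.mem_range] at hk; exact hk.1
    simp only [Function.comp_apply, Prod.mk.injEq]
    refine ⟨?_, trivial⟩
    ring
  rw [hB]
  rw [show (0 : Int) = ((0 : Nat) : Int) by norm_num,
    pvScanA_eq (pvBin2 val) (n - ((pvBin2 val).length : Int)) key ((pvBin2 val).length + 1) 0 pauli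
      (by omega) (by omega)]
  by_cases h0 : w = 0
  · have hval0 : val = 0 := by omega
    subst hval0
    simp only [hw] at h0 ⊢
    rw [show pvBin2 0 = ['0'] by rfl]
    rw [show pvOnes ['0'] 0 = [] by decide]
    simp [h0]
  · have hbin : pvBin2 val = pvBits w := by
      unfold pvBin2
      rw [if_neg (by omega), if_neg (by omega), List.nil_append]
      congr 1
      omega
    rw [hbin, pvOnes_bits, ← hL, pvBits_length, ← hL]

-- 0 ≤ x → 0 ≤ x >>> k (Int arithmetic shift of a nonnegative integer)
theorem pvShiftRight_nonneg (x : Int) (k : Nat) (hx : 0 ≤ x) : 0 ≤ x >>> k := by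
  rw [show x = ((x.toNat : Nat) : Int) by omega, ← Int.shiftRight_natCast_right,
    Int.shiftRight_natCast]
  exact Int.natCast_nonneg _

-- ===== VERDICT (by name: the statement is the Claim_ definition above) =====
theorem RealBin2Pauli_spec : Claim_equal_RealBin2Pauli := by
  intro a n swap _ hpre
  obtain ⟨hn, ha⟩ := hpre
  unfold Spec_RealBin2Pauli RealBin2Pauli RealBin2Pauli_alt
  have hax0 : 0 ≤ (if swap then PySem.Int.band a (2 ^ n.toNat - 1) else a >>> n.toNat) := by
    split
    · exact PySem.Int.band_nonneg_of_nonneg_left _ ha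
    · exact pvShiftRight_nonneg a n.toNat ha
  have haz0 : 0 ≤ (if swap then a >>> n.toNat else PySem.Int.band a (2 ^ n.toNat - 1)) := by
    split
    · exact pvShiftRight_nonneg a n.toNat ha
    · exact PySem.Int.band_nonneg_of_nonneg_left _ ha
  set ax0 := if swap then PySem.Int.band a (2 ^ n.toNat - 1) else a >>> n.toNat with hax0d
  set az0 := if swap then a >>> n.toNat else PySem.Int.band a (2 ^ n.toNat - 1) with haz0d
  have hay : 0 ≤ PySem.Int.band ax0 az0 := PySem.Int.band_nonneg_of_nonneg_left _ hax0
  have hax : 0 ≤ PySem.Int.band (Int.not (PySem.Int.band ax0 az0)) ax0 := by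
    rw [PySem.Int.band_comm]
    exact PySem.Int.band_nonneg_of_nonneg_left _ hax0
  have haz : 0 ≤ PySem.Int.band (Int.not (PySem.Int.band ax0 az0)) az0 := by
    rw [PySem.Int.band_comm]
    exact PySem.Int.band_nonneg_of_nonneg_left _ haz0
  simp only [List.foldl]
  rw [pvPerVal _ _ _ _ hax, pvPerVal _ _ _ _ hay, pvPerVal _ _ _ _ haz]
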